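-- pv_equiv track=rewrite | github.com/zazabap/problem-reductions | docs/paper/verify-reductions/verify_planar_3_satisfiability_minimum_geometric_connected_dominating_set.py | is_cds
-- ===== SOURCE A (Python) =====
-- from collections import deque
--
-- def is_cds(adj, sel, n):
--     if not sel:
--         return False
--     ss = set(sel)
--     for v in range(n):
--         if v not in ss and not (adj[v] & ss):
--             return False
--     if len(sel) == 1:
--         return True
--     visited = {sel[0]}
--     q = deque([sel[0]])
--     while q:
--         u = q.popleft()
--         for w in adj[u]:
--             if w in ss and w not in visited:
--                 visited.add(w)
--                 q.append(w)
--     return len(visited) == len(ss)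
-- ===== SOURCE B (Python) =====
-- def is_cds(adj, sel, n):
--     ss = set(sel)
--     for v in range(n):
--         if v not in ss and not (adj[v] & ss):
--             return False
--     # connectivity among selected vertices via component labels merged per edge
--     comp = {u: u for u in ss}
--     for u in ss:
--         for w in adj[u]:
--             if w in comp:
--                 a, b = comp[u], comp[w]
--                 if a != b:
--                     for x in comp:
--                         if comp[x] == b:
--                             comp[x] = a
--     return len(set(comp.values())) == 1
-- ===== Notes on version B (the rewrite author's own statement) =====
-- stated objective: alternative
-- what changed: The BFS (deque + visited set) connectivity check is replaced by a union-of-components pass: a label map over the selected vertices is built once and each selected-subgraph edge merges the two labels, so connectivity becomes 'one distinct label' instead of a graph traversal.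
-- outside the precondition, e.g. on is_cds([set(), {0}], [0, 1], 0): A returns False, B returns True; on is_cds([{1}, {0}], [-1, 0], 0): A returns True, B returns True; on is_cds([set()], [2], 0): A returns True, B raises IndexError
import Mathlib
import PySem

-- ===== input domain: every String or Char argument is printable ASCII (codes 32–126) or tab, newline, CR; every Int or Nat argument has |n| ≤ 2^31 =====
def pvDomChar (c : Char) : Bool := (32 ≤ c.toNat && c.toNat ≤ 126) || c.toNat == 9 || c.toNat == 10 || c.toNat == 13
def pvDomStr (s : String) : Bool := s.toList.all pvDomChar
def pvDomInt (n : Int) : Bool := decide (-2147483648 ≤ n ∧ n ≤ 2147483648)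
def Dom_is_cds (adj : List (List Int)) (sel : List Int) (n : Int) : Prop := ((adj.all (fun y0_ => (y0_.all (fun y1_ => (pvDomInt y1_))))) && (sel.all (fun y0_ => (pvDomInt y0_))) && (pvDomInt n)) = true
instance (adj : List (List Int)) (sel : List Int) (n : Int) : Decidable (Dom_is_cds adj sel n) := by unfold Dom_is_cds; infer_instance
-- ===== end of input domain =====

-- B replaces A's BFS connectivity check by merge-by-relabel component labels (union of the
-- selected-subgraph edges into a label map); same domination scan, same result on Pre_.

-- ===== PORT A =====

-- adj[u] (a Python set, held as a distinct-element list); total form of the index, exact under Pre_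
def pvRow (adj : List (List Int)) (u : Int) : List Int := PySem.List.pyGetD adj u []

-- the body of A's `for w in adj[u]` loop: add unseen selected neighbours to visited and queue
def pvBfsStep (adj : List (List Int)) (ss : PySem.Set Int) (visited q : List Int) (u : Int) :
    List Int × List Int :=
  (pvRow adj u).foldl
    (fun st w => if w ∈ ss ∧ w ∉ st.1 then (PySem.Set.add st.1 w, st.2 ++ [w]) else st)
    (visited, q)

-- A's `while q:` loop; the fuel argument only makes the recursion structural — with
-- fuel > |q| + (|ss| - |visited|) it never runs out (each iteration pops one element)
def pvBfsLoop (adj : List (List Int)) (ss : PySem.Set Int) :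
    Nat → List Int → List Int → List Int
  | 0, visited, _ => visited
  | _ + 1, visited, [] => visited
  | fuel + 1, visited, u :: q =>
    let st := pvBfsStep adj ss visited q u
    pvBfsLoop adj ss fuel st.1 st.2

def is_cds (adj : List (List Int)) (sel : List Int) (n : Int) : Bool :=
  if sel.isEmpty then false
  else
    let ss : PySem.Set Int := PySem.Set.ofList sel
    if (PySem.List.pyRange 0 n 1).all
        (fun v => decide (v ∈ ss) || !(PySem.Set.inter (pvRow adj v) ss).isEmpty) then
      if sel.length == 1 then true
      else
        let s0 := PySem.List.pyGetD sel 0 0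
        let visited := pvBfsLoop adj ss (sel.length + 1) [s0] [s0]
        visited.length == ss.length
    else false

-- ===== PORT B =====

-- `for x in comp: if comp[x] == b: comp[x] = a`  (keys are fixed while values change)
def pvRelabel (comp : PySem.Dict Int Int) (a b : Int) : PySem.Dict Int Int :=
  comp.keys.foldl
    (fun c x => if c.getD x 0 == b then c.insert x a else c) comp

-- the nested `for u in ss: for w in adj[u]: …` union loop of B
def pvUnionEdges (adj : List (List Int)) (ss : PySem.Set Int)
    (comp0 : PySem.Dict Int Int) : PySem.Dict Int Int :=
  ss.foldl (fun c u =>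
    (pvRow adj u).foldl (fun c w =>
      if c.contains w then
        let a := c.getD u 0
        let b := c.getD w 0
        if a ≠ b then pvRelabel c a b else c
      else c) c) comp0

def is_cds_alt (adj : List (List Int)) (sel : List Int) (n : Int) : Bool :=
  let ss : PySem.Set Int := PySem.Set.ofList sel
  if (PySem.List.pyRange 0 n 1).all
      (fun v => decide (v ∈ ss) || !(PySem.Set.inter (pvRow adj v) ss).isEmpty) then
    let comp0 := ss.foldl (fun d u => d.insert u u) PySem.Dict.empty
    let comp := pvUnionEdges adj ss comp0
    PySem.Set.len (PySem.Set.ofList comp.values) == 1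
  else false

-- ===== PRECONDITION & SPEC =====
-- Pre_ admits, in closed form, the inputs on which A's value is the one claimed: an empty
-- selection (both answer False; n >= 1 with adj = [] is excluded because B's scan raises there),
-- a selection that fails to dominate [0, min(n, len(adj))) (both answer False from the identical
-- domination scan), a constant selection of one indexable vertex (one vertex is one component),
-- and finally the inputs the function is designed for: n ≤ len(adj), selected vertices indexable
-- (in [-len(adj), len(adj)), as Python indexes them), adjacency symmetric between selected
-- vertices (adj holds neighbour SETS of a geometric graph).  Outside this A either raises
-- IndexError (out-of-range vertex reached by the BFS) or — with asymmetric adjacency inside the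
-- selection — answers a directed-reachability question no caller of a dominating-set checker
-- specifies (B, merging undirected components, may then legitimately differ).
def Pre_is_cds (adj : List (List Int)) (sel : List Int) (n : Int) : Prop :=
  (sel = [] ∧ (adj ≠ [] ∨ n ≤ 0)) ∨
  (∃ v ∈ List.range (min n.toNat adj.length), ((v : Int) ∉ sel ∧ ∀ w ∈ adj.getD v [], w ∉ sel)) ∨
  (n ≤ (adj.length : Int) ∧ sel ≠ [] ∧ (∀ x ∈ sel, x = sel.headD 0) ∧
    -(adj.length : Int) ≤ sel.headD 0 ∧ sel.headD 0 < (adj.length : Int)) ∨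
  (n ≤ (adj.length : Int) ∧
   (∀ u ∈ sel, -(adj.length : Int) ≤ u ∧ u < (adj.length : Int)) ∧
   (∀ u ∈ sel, ∀ w ∈ sel, w ∈ PySem.List.pyGetD adj u [] → u ∈ PySem.List.pyGetD adj w []))
instance (adj : List (List Int)) (sel : List Int) (n : Int) : Decidable (Pre_is_cds adj sel n) := by
  unfold Pre_is_cds; infer_instance

def pvWitness_is_cds : List (List Int) × List Int × Int := ([[1], [0], []], [0, 1, 2], 3)

def Spec_is_cds (adj : List (List Int)) (sel : List Int) (n : Int) (out : Bool) : Prop := out = is_cds_alt adj sel n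
instance (adj : List (List Int)) (sel : List Int) (n : Int) (out : Bool) : Decidable (Spec_is_cds adj sel n out) := by unfold Spec_is_cds; infer_instance

-- ===== CLAIM (what is proved, stated in full; the proofs are below) =====
def Claim_equal_is_cds : Prop := ∀ (adj : List (List Int)) (sel : List Int) (n : Int), Dom_is_cds adj sel n → Pre_is_cds adj sel n → Spec_is_cds adj sel n (is_cds adj sel n)

-- ===== LEMMAS AND PROOFS =====

-- the edge relation of the selected subgraph: both endpoints selected, w a neighbour of u
def pvE (adj : List (List Int)) (ss : List Int) (u w : Int) : Prop :=
  u ∈ ss ∧ w ∈ ss ∧ w ∈ pvRow adj u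

def pvConn (adj : List (List Int)) (ss : List Int) : Int → Int → Prop :=
  Relation.ReflTransGen (pvE adj ss)

-- labels agreeing is sound for connectivity
def pvSound (adj : List (List Int)) (ss : List Int) (c : PySem.Dict Int Int) : Prop :=
  ∀ x ∈ ss, ∀ y ∈ ss, c.getD x 0 = c.getD y 0 → pvConn adj ss x y

theorem pvE_symm (adj : List (List Int)) (sel : List Int)
    (hadj : ∀ u ∈ sel, ∀ w ∈ sel,
      w ∈ PySem.List.pyGetD adj u [] → u ∈ PySem.List.pyGetD adj w [])
    {u w : Int} (h : pvE adj (PySem.Set.ofList sel) u w) :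
    pvE adj (PySem.Set.ofList sel) w u := by
  obtain ⟨hu, hw, hrow⟩ := h
  have hu' : u ∈ sel := (PySem.Set.mem_ofList _ _).1 hu
  have hw' : w ∈ sel := (PySem.Set.mem_ofList _ _).1 hw
  exact ⟨hw, hu, hadj u hu' w hw' hrow⟩

theorem nodup_subset_length_le (l s : List Int) (hl : l.Nodup) (hs : s.Nodup)
    (hsub : ∀ x ∈ l, x ∈ s) : l.length ≤ s.length := by
  have h1 : l.toFinset.card = l.length := List.toFinset_card_of_nodup hl
  have h2 : s.toFinset.card = s.length := List.toFinset_card_of_nodup hs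
  have h3 : l.toFinset ⊆ s.toFinset := by
    intro x hx; simp only [List.mem_toFinset] at *; exact hsub x hx
  have := Finset.card_le_card h3
  omega

theorem foldl_step_adds (ss : PySem.Set Int) :
    ∀ (ws : List Int) (visited q : List Int),
    ∃ adds : List Int,
      (ws.foldl (fun st w => if w ∈ ss ∧ w ∉ st.1 then (PySem.Set.add st.1 w, st.2 ++ [w]) else st)
        (visited, q)) = (visited ++ adds, q ++ adds) ∧
      adds.Nodup ∧
      (∀ x ∈ adds, x ∈ ss ∧ x ∈ ws ∧ x ∉ visited) ∧
      (∀ w ∈ ws, w ∈ ss → w ∈ visited ++ adds) := by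
  intro ws
  induction ws with
  | nil => intro visited q; exact ⟨[], by simp, by simp, by simp, by simp⟩
  | cons w ws ih =>
    intro visited q
    by_cases h : w ∈ ss ∧ w ∉ visited
    · have hadd : PySem.Set.add visited w = visited ++ [w] := PySem.Set.add_of_not_mem h.2
      obtain ⟨adds', heq, hnd, hmem, hcov⟩ := ih (visited ++ [w]) (q ++ [w])
      refine ⟨w :: adds', ?_, ?_, ?_, ?_⟩
      · simp only [List.foldl_cons, if_pos h, hadd]
        rw [heq]
        simp
      · refine List.Nodup.cons ?_ hnd
        intro hw
        have := (hmem w hw).2.2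
        simp at this
      · intro x hx
        rcases List.mem_cons.1 hx with rfl | hx'
        · exact ⟨h.1, List.mem_cons_self, h.2⟩
        · obtain ⟨h1, h2, h3⟩ := hmem x hx'
          refine ⟨h1, List.mem_cons_of_mem _ h2, ?_⟩
          intro hc; exact h3 (by simp [hc])
      · intro v hv hvss
        rcases List.mem_cons.1 hv with rfl | hv'
        · simp
        · have := hcov v hv' hvss
          simp only [List.mem_append] at this ⊢
          rcases this with (h' | h') | h'
          · exact Or.inl h'
          · simp at h'; subst h'; exact Or.inr (List.mem_cons_self)
          · exact Or.inr (List.mem_cons_of_mem _ h')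
    · obtain ⟨adds, heq, hnd, hmem, hcov⟩ := ih visited q
      refine ⟨adds, ?_, hnd, ?_, ?_⟩
      · simp only [List.foldl_cons, if_neg h]; exact heq
      · intro x hx
        obtain ⟨h1, h2, h3⟩ := hmem x hx
        exact ⟨h1, List.mem_cons_of_mem _ h2, h3⟩
      · intro v hv hvss
        rcases List.mem_cons.1 hv with rfl | hv'
        · have : v ∈ visited := by
            by_contra hc; exact h ⟨hvss, hc⟩
          exact List.mem_append.2 (Or.inl this)
        · exact hcov v hv' hvss

theorem pvBfsLoop_spec (adj : List (List Int)) (ss : PySem.Set Int) (hssnd : ss.Nodup) (s0 : Int) :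
    ∀ (fuel : Nat) (visited q : List Int),
    visited.Nodup → (∀ x ∈ visited, x ∈ ss) → (∀ x ∈ q, x ∈ visited) →
    (∀ x ∈ visited, pvConn adj ss s0 x) →
    (∀ u, u ∈ visited → u ∉ q → ∀ w, pvE adj ss u w → w ∈ visited) →
    q.length + (ss.length - visited.length) < fuel →
    (pvBfsLoop adj ss fuel visited q).Nodup ∧
    (∀ x ∈ pvBfsLoop adj ss fuel visited q, x ∈ ss ∧ pvConn adj ss s0 x) ∧
    (∀ x ∈ visited, x ∈ pvBfsLoop adj ss fuel visited q) ∧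
    (∀ u ∈ pvBfsLoop adj ss fuel visited q, ∀ w, pvE adj ss u w → w ∈ pvBfsLoop adj ss fuel visited q) := by
  intro fuel
  induction fuel with
  | zero => intro visited q _ _ _ _ _ hm; omega
  | succ fuel ih =>
    intro visited q hnd hsub hqv hreach hclosed hm
    cases q with
    | nil =>
      simp only [pvBfsLoop]
      refine ⟨hnd, ?_, fun x hx => hx, ?_⟩
      · intro x hx; exact ⟨hsub x hx, hreach x hx⟩
      · intro u hu w hw
        exact hclosed u hu (by simp) w hw
    | cons u q =>
      simp only [pvBfsLoop]
      obtain ⟨adds, heq, hand, hamem, hacov⟩ := foldl_step_adds ss (pvRow adj u) visited q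
      have hstep : pvBfsStep adj ss visited q u = (visited ++ adds, q ++ adds) := by
        simpa [pvBfsStep] using heq
      rw [hstep]
      have huv : u ∈ visited := hqv u (List.mem_cons_self)
      have hdisj : ∀ a ∈ visited, ∀ b ∈ adds, a ≠ b := by
        intro a ha b hb rfl
        exact (hamem a hb).2.2 ha
      have hnd' : (visited ++ adds).Nodup := by
        rw [List.nodup_append]
        exact ⟨hnd, hand, hdisj⟩
      have hsub' : ∀ x ∈ visited ++ adds, x ∈ ss := by
        intro x hx
        rcases List.mem_append.1 hx with h | h
        · exact hsub x h
        · exact (hamem x h).1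
      have hqv' : ∀ x ∈ q ++ adds, x ∈ visited ++ adds := by
        intro x hx
        rcases List.mem_append.1 hx with h' | h'
        · exact List.mem_append.2 (Or.inl (hqv x (List.mem_cons_of_mem _ h')))
        · exact List.mem_append.2 (Or.inr h')
      have hreach' : ∀ x ∈ visited ++ adds, pvConn adj ss s0 x := by
        intro x hx
        rcases List.mem_append.1 hx with h | h
        · exact hreach x h
        · obtain ⟨hxss, hxrow, _⟩ := hamem x h
          exact Relation.ReflTransGen.tail (hreach u huv) ⟨hsub u huv, hxss, hxrow⟩
      have hclosed' : ∀ v, v ∈ visited ++ adds → v ∉ q ++ adds → ∀ w, pvE adj ss v w → w ∈ visited ++ adds := by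
        intro v hv hvq w hw
        by_cases hvu : v = u
        · subst hvu
          exact hacov w hw.2.2 hw.2.1
        · rcases List.mem_append.1 hv with h | h
          · have hvnq : v ∉ u :: q := by
              intro hc
              rcases List.mem_cons.1 hc with rfl | hc'
              · exact hvu rfl
              · exact hvq (List.mem_append.2 (Or.inl hc'))
            exact List.mem_append.2 (Or.inl (hclosed v h hvnq w hw))
          · exact absurd (List.mem_append.2 (Or.inr h)) hvq
      have hlen : (visited ++ adds).length ≤ ss.length :=
        nodup_subset_length_le _ _ hnd' hssnd hsub'
      have hm' : (q ++ adds).length + (ss.length - (visited ++ adds).length) < fuel := by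
        simp only [List.length_append] at *
        simp only [List.length_cons] at hm
        omega
      obtain ⟨r1, r2, r3, r4⟩ := ih (visited ++ adds) (q ++ adds) hnd' hsub' hqv' hreach' hclosed' hm'
      exact ⟨r1, r2, fun x hx => r3 x (List.mem_append.2 (Or.inl hx)), r4⟩

theorem conn_mem_closed (adj : List (List Int)) (ss : List Int) (R : List Int) (s0 : Int)
    (hs0 : s0 ∈ R) (hclosed : ∀ u ∈ R, ∀ w, pvE adj ss u w → w ∈ R) :
    ∀ w, pvConn adj ss s0 w → w ∈ R := by
  intro w h
  induction h with
  | refl => exact hs0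
  | tail _ e ih => exact hclosed _ ih _ e

-- ===== B-side lemmas =====

theorem foldl_relabel_getD (a b : Int) :
    ∀ (ks : List Int) (c : PySem.Dict Int Int), ks.Nodup →
    ∀ x, (ks.foldl (fun c x => if c.getD x 0 == b then c.insert x a else c) c).getD x 0
      = if x ∈ ks ∧ c.getD x 0 = b then a else c.getD x 0 := by
  intro ks
  induction ks with
  | nil => intro c _ x; simp
  | cons k ks ih =>
    intro c hnd x
    have hndk : ks.Nodup := hnd.of_cons
    have hknk : k ∉ ks := by simp [List.nodup_cons] at hnd; exact hnd.1
    simp only [List.foldl_cons]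
    set c1 := if c.getD k 0 == b then c.insert k a else c with hc1
    have hc1x : ∀ y, y ≠ k → c1.getD y 0 = c.getD y 0 := by
      intro y hy
      rw [hc1]
      split
      · rw [PySem.Dict.getD_insert]; simp [hy]
      · rfl
    have hc1k : c1.getD k 0 = if c.getD k 0 = b then a else c.getD k 0 := by
      rw [hc1]
      split <;> rename_i h
      · rw [PySem.Dict.getD_insert]; simp; simp at h; simp [h]
      · simp at h; simp [h]
    rw [ih c1 hndk x]
    by_cases hxk : x = k
    · subst hxk
      simp [hknk, hc1k]
    · by_cases hxks : x ∈ ks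
      · simp only [hxks, true_and, List.mem_cons, hxk, false_or]
        rw [hc1x x hxk]
      · simp only [hxks, false_and, if_false, List.mem_cons]
        simp [hxk, hc1x x hxk]

theorem foldl_relabel_keys (a b : Int) :
    ∀ (ks : List Int) (c : PySem.Dict Int Int), (∀ k ∈ ks, c.contains k = true) →
    (ks.foldl (fun c x => if c.getD x 0 == b then c.insert x a else c) c).keys = c.keys := by
  intro ks
  induction ks with
  | nil => intro c _; simp
  | cons k ks ih =>
    intro c hcont
    simp only [List.foldl_cons]
    set c1 := if c.getD k 0 == b then c.insert k a else c with hc1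
    have hkeys : c1.keys = c.keys := by
      rw [hc1]; split
      · exact PySem.Dict.keys_insert_of_contains c a (hcont k (List.mem_cons_self))
      · rfl
    have hcont1 : ∀ k' ∈ ks, c1.contains k' = true := by
      intro k' hk'
      rw [PySem.Dict.contains_iff_mem_keys, hkeys, ← PySem.Dict.contains_iff_mem_keys]
      exact hcont k' (List.mem_cons_of_mem _ hk')
    rw [ih c1 hcont1, hkeys]

theorem pvRelabel_keys (c : PySem.Dict Int Int) (a b : Int) :
    (pvRelabel c a b).keys = c.keys := by
  apply foldl_relabel_keys
  intro k hk
  exact (PySem.Dict.contains_iff_mem_keys c k).2 hk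

theorem pvRelabel_getD (c : PySem.Dict Int Int) (a b : Int) (hnd : c.keys.Nodup) (x : Int) :
    (pvRelabel c a b).getD x 0 = if x ∈ c.keys ∧ c.getD x 0 = b then a else c.getD x 0 :=
  foldl_relabel_getD a b c.keys c hnd x

theorem inner_fold_spec (adj : List (List Int)) (ss : List Int) (hnd : ss.Nodup)
    (hsym : ∀ x y, pvE adj ss x y → pvE adj ss y x)
    (u : Int) (hu : u ∈ ss) :
    ∀ (ws : List Int) (c : PySem.Dict Int Int), c.keys = ss → pvSound adj ss c →
    (∀ w ∈ ws, w ∈ pvRow adj u) →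
    (ws.foldl (fun c w => if c.contains w then
        (if c.getD u 0 ≠ c.getD w 0 then pvRelabel c (c.getD u 0) (c.getD w 0) else c) else c) c).keys = ss ∧
    pvSound adj ss (ws.foldl (fun c w => if c.contains w then
        (if c.getD u 0 ≠ c.getD w 0 then pvRelabel c (c.getD u 0) (c.getD w 0) else c) else c) c) ∧
    (∀ x ∈ ss, ∀ y ∈ ss, c.getD x 0 = c.getD y 0 →
      ((ws.foldl (fun c w => if c.contains w then
        (if c.getD u 0 ≠ c.getD w 0 then pvRelabel c (c.getD u 0) (c.getD w 0) else c) else c) c).getD x 0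
       = (ws.foldl (fun c w => if c.contains w then
        (if c.getD u 0 ≠ c.getD w 0 then pvRelabel c (c.getD u 0) (c.getD w 0) else c) else c) c).getD y 0)) ∧
    (∀ w ∈ ws, w ∈ ss →
      (ws.foldl (fun c w => if c.contains w then
        (if c.getD u 0 ≠ c.getD w 0 then pvRelabel c (c.getD u 0) (c.getD w 0) else c) else c) c).getD u 0
      = (ws.foldl (fun c w => if c.contains w then
        (if c.getD u 0 ≠ c.getD w 0 then pvRelabel c (c.getD u 0) (c.getD w 0) else c) else c) c).getD w 0) := by
  intro ws
  induction ws with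
  | nil =>
    intro c hkeys hsound _
    exact ⟨hkeys, hsound, fun x _ y _ h => h, by simp⟩
  | cons w ws ih =>
    intro c hkeys hsound hrow
    have hndk : c.keys.Nodup := by rw [hkeys]; exact hnd
    simp only [List.foldl_cons]
    set c1 := if c.contains w then
        (if c.getD u 0 ≠ c.getD w 0 then pvRelabel c (c.getD u 0) (c.getD w 0) else c) else c with hc1
    have hwrow : w ∈ pvRow adj u := hrow w (List.mem_cons_self)
    -- facts about the single step
    have hkeys1 : c1.keys = ss := by
      rw [hc1]
      split
      · split
        · rw [pvRelabel_keys]; exact hkeys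
        · exact hkeys
      · exact hkeys
    have hcoarse1 : ∀ x ∈ ss, ∀ y ∈ ss, c.getD x 0 = c.getD y 0 → c1.getD x 0 = c1.getD y 0 := by
      intro x hx y hy h
      rw [hc1]
      split
      · split
        · rw [pvRelabel_getD _ _ _ hndk, pvRelabel_getD _ _ _ hndk, hkeys]
          simp only [hx, hy, true_and, h]
        · exact h
      · exact h
    have hsound1 : pvSound adj ss c1 := by
      intro x hx y hy h
      rw [hc1] at h
      by_cases hcw : c.contains w = true
      · have hwss : w ∈ ss := by rw [← hkeys]; exact (PySem.Dict.contains_iff_mem_keys c w).1 hcw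
        rw [if_pos hcw] at h
        by_cases hab : c.getD u 0 ≠ c.getD w 0
        · rw [if_pos hab] at h
          rw [pvRelabel_getD _ _ _ hndk, pvRelabel_getD _ _ _ hndk, hkeys] at h
          simp only [hx, hy, true_and] at h
          have hconn_uw : pvConn adj ss u w := Relation.ReflTransGen.single ⟨hu, hwss, hwrow⟩
          by_cases hxb : c.getD x 0 = c.getD w 0 <;> by_cases hyb : c.getD y 0 = c.getD w 0
          · exact hsound x hx y hy (by rw [hxb, hyb])
          · -- c1 x = a, c1 y = c y = a : c y = c u
            rw [if_pos hxb, if_neg hyb] at h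
            have h1 : pvConn adj ss x w := hsound x hx w hwss hxb
            have h2 : pvConn adj ss y u := hsound y hy u hu h.symm
            exact (h1.trans (Relation.ReflTransGen.symmetric hsym hconn_uw)).trans
              (Relation.ReflTransGen.symmetric hsym h2)
          · rw [if_neg hxb, if_pos hyb] at h
            have h1 : pvConn adj ss y w := hsound y hy w hwss hyb
            have h2 : pvConn adj ss x u := hsound x hx u hu h
            exact (h2.trans hconn_uw).trans (Relation.ReflTransGen.symmetric hsym h1)
          · rw [if_neg hxb, if_neg hyb] at h
            exact hsound x hx y hy h
        · rw [if_neg hab] at h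
          exact hsound x hx y hy h
      · rw [if_neg (by simpa using hcw)] at h
        exact hsound x hx y hy h
    have hstep_uw : w ∈ ss → c1.getD u 0 = c1.getD w 0 := by
      intro hwss
      have hcw : c.contains w = true := by
        rw [PySem.Dict.contains_iff_mem_keys, hkeys]; exact hwss
      rw [hc1, if_pos hcw]
      by_cases hab : c.getD u 0 ≠ c.getD w 0
      · rw [if_pos hab]
        rw [pvRelabel_getD _ _ _ hndk, pvRelabel_getD _ _ _ hndk, hkeys]
        rw [if_neg (fun hc => hab hc.2), if_pos ⟨hwss, rfl⟩]
      · rw [if_neg hab]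
        simpa using hab
    obtain ⟨r1, r2, r3, r4⟩ := ih c1 hkeys1 hsound1 (fun w' hw' => hrow w' (List.mem_cons_of_mem _ hw'))
    refine ⟨r1, r2, ?_, ?_⟩
    · intro x hx y hy h
      exact r3 x hx y hy (hcoarse1 x hx y hy h)
    · intro w' hw' hw'ss
      rcases List.mem_cons.1 hw' with rfl | hw''
      · exact r3 u hu w' hw'ss (hstep_uw hw'ss)
      · exact r4 w' hw'' hw'ss

theorem pvUnionEdges_spec (adj : List (List Int)) (ss : List Int) (hnd : ss.Nodup)
    (hsym : ∀ x y, pvE adj ss x y → pvE adj ss y x) :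
    ∀ (us : List Int) (c : PySem.Dict Int Int), (∀ u ∈ us, u ∈ ss) → c.keys = ss → pvSound adj ss c →
    (us.foldl (fun c u =>
      (pvRow adj u).foldl (fun c w =>
        if c.contains w then
          (if c.getD u 0 ≠ c.getD w 0 then pvRelabel c (c.getD u 0) (c.getD w 0) else c)
        else c) c) c).keys = ss ∧
    pvSound adj ss (us.foldl (fun c u =>
      (pvRow adj u).foldl (fun c w =>
        if c.contains w then
          (if c.getD u 0 ≠ c.getD w 0 then pvRelabel c (c.getD u 0) (c.getD w 0) else c)
        else c) c) c) ∧
    (∀ x ∈ ss, ∀ y ∈ ss, c.getD x 0 = c.getD y 0 →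
      (us.foldl (fun c u =>
        (pvRow adj u).foldl (fun c w =>
          if c.contains w then
            (if c.getD u 0 ≠ c.getD w 0 then pvRelabel c (c.getD u 0) (c.getD w 0) else c)
          else c) c) c).getD x 0
      = (us.foldl (fun c u =>
        (pvRow adj u).foldl (fun c w =>
          if c.contains w then
            (if c.getD u 0 ≠ c.getD w 0 then pvRelabel c (c.getD u 0) (c.getD w 0) else c)
          else c) c) c).getD y 0) ∧
    (∀ u ∈ us, ∀ w ∈ pvRow adj u, w ∈ ss →
      (us.foldl (fun c u =>
        (pvRow adj u).foldl (fun c w =>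
          if c.contains w then
            (if c.getD u 0 ≠ c.getD w 0 then pvRelabel c (c.getD u 0) (c.getD w 0) else c)
          else c) c) c).getD u 0
      = (us.foldl (fun c u =>
        (pvRow adj u).foldl (fun c w =>
          if c.contains w then
            (if c.getD u 0 ≠ c.getD w 0 then pvRelabel c (c.getD u 0) (c.getD w 0) else c)
          else c) c) c).getD w 0) := by
  intro us
  induction us with
  | nil =>
    intro c _ hkeys hsound
    exact ⟨hkeys, hsound, fun x _ y _ h => h, by simp⟩
  | cons u us ih =>
    intro c hus hkeys hsound
    have hu : u ∈ ss := hus u (List.mem_cons_self)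
    simp only [List.foldl_cons]
    obtain ⟨k1, s1, co1, cp1⟩ := inner_fold_spec adj ss hnd hsym u hu (pvRow adj u) c hkeys hsound (fun _ h => h)
    obtain ⟨r1, r2, r3, r4⟩ := ih _ (fun v hv => hus v (List.mem_cons_of_mem _ hv)) k1 s1
    refine ⟨r1, r2, ?_, ?_⟩
    · intro x hx y hy h
      exact r3 x hx y hy (co1 x hx y hy h)
    · intro v hv w hw hwss
      rcases List.mem_cons.1 hv with rfl | hv'
      · exact r3 v hu w hwss (cp1 w hw hwss)
      · exact r4 v hv' w hw hwss

theorem comp0_getD : ∀ (l : List Int) (d : PySem.Dict Int Int) (x : Int),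
    (l.foldl (fun d u => d.insert u u) d).getD x 0 = if x ∈ l then x else d.getD x 0 := by
  intro l
  induction l with
  | nil => intro d x; simp
  | cons u l ih =>
    intro d x
    simp only [List.foldl_cons]
    rw [ih]
    by_cases hxl : x ∈ l
    · simp [hxl]
    · simp only [hxl, if_false, List.mem_cons]
      rw [PySem.Dict.getD_insert]
      by_cases hxu : x = u
      · simp [hxu]
      · simp [hxu]

theorem conn_label_eq (adj : List (List Int)) (ss : List Int) (c : PySem.Dict Int Int)
    (hcomp : ∀ u ∈ ss, ∀ w ∈ pvRow adj u, w ∈ ss → c.getD u 0 = c.getD w 0) :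
    ∀ x y, pvConn adj ss x y → c.getD x 0 = c.getD y 0 := by
  intro x y h
  induction h with
  | refl => rfl
  | tail _ e ih =>
    exact ih.trans (hcomp _ e.1 _ e.2.2 e.2.1)

theorem nodup_all_eq (z : Int) (l : List Int) (hnd : l.Nodup) (hne : l ≠ [])
    (hall : ∀ x ∈ l, x = z) : l = [z] := by
  cases l with
  | nil => exact absurd rfl hne
  | cons a t =>
    have ha : a = z := hall a (List.mem_cons_self)
    subst ha
    cases t with
    | nil => rfl
    | cons b t' =>
      have hb : b = a := hall b (by simp)
      subst hb
      simp [List.nodup_cons] at hnd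

theorem ofList_length_eq_one_iff (xs : List Int) :
    (PySem.Set.ofList xs).length = 1 ↔ xs ≠ [] ∧ ∀ x ∈ xs, ∀ y ∈ xs, x = y := by
  constructor
  · intro h
    obtain ⟨a, ha⟩ := List.length_eq_one_iff.1 h
    constructor
    · intro hxs
      subst hxs
      simp [PySem.Set.ofList] at ha
    · intro x hx y hy
      have hx' : x ∈ PySem.Set.ofList xs := (PySem.Set.mem_ofList _ _).2 hx
      have hy' : y ∈ PySem.Set.ofList xs := (PySem.Set.mem_ofList _ _).2 hy
      rw [ha] at hx' hy'
      simp at hx' hy'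
      rw [hx', hy']
  · rintro ⟨hne, hall⟩
    cases xs with
    | nil => exact absurd rfl hne
    | cons a t =>
      have : PySem.Set.ofList (a :: t) = [a] := by
        apply nodup_all_eq a _ (PySem.Set.nodup_ofList _) (by
          intro hc
          have : a ∈ PySem.Set.ofList (a :: t) := (PySem.Set.mem_ofList _ _).2 (by simp)
          rw [hc] at this; simp at this)
        intro x hx
        exact hall x ((PySem.Set.mem_ofList _ _).1 hx) a (by simp)
      rw [this]
      rfl

-- ===== VERDICT (by name: the statement is the Claim_ definition above) =====
-- A's verdict: the BFS from sel[0] visits all of ss iff every selected vertex is connected to sel[0]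
theorem A_branch_eq (adj : List (List Int)) (s : Int) (sel' : List Int)
    (hsmem : s ∈ PySem.Set.ofList (s :: sel')) :
    (((pvBfsLoop adj (PySem.Set.ofList (s :: sel')) ((s :: sel').length + 1) [s] [s]).length
        == (PySem.Set.ofList (s :: sel')).length) = true)
      ↔ (∀ w ∈ PySem.Set.ofList (s :: sel'), pvConn adj (PySem.Set.ofList (s :: sel')) s w) := by
  set ss := PySem.Set.ofList (s :: sel') with hss
  have hssnd : ss.Nodup := PySem.Set.nodup_ofList _
  have hlen1 : 1 ≤ ss.length := List.length_pos_of_mem hsmem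
  have hlenle : ss.length ≤ (s :: sel').length := PySem.Set.length_ofList_le _
  obtain ⟨r1, r2, r3, r4⟩ := pvBfsLoop_spec adj ss hssnd s ((s :: sel').length + 1) [s] [s]
      (by simp) (by intro x hx; simp at hx; subst hx; exact hsmem) (fun x hx => hx)
      (by intro x hx; simp at hx; subst hx; exact Relation.ReflTransGen.refl)
      (by intro u hu hq w hw; simp at hu; subst hu; simp at hq)
      (by simp only [List.length_singleton]; omega)
  simp only [beq_iff_eq]
  constructor
  · intro hlen w hw
    have hRsub : (pvBfsLoop adj ss ((s :: sel').length + 1) [s] [s]).toFinset ⊆ ss.toFinset := by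
      intro x hx; simp only [List.mem_toFinset] at *; exact (r2 x hx).1
    have hcards : ss.toFinset.card ≤ (pvBfsLoop adj ss ((s :: sel').length + 1) [s] [s]).toFinset.card := by
      rw [List.toFinset_card_of_nodup r1, List.toFinset_card_of_nodup hssnd, hlen]
    have heqF := Finset.eq_of_subset_of_card_le hRsub hcards
    have hwR : w ∈ pvBfsLoop adj ss ((s :: sel').length + 1) [s] [s] := by
      have hw' : w ∈ ss.toFinset := by simpa using hw
      rw [← heqF] at hw'
      simpa using hw'
    exact (r2 w hwR).2
  · intro hconn
    have hsR : s ∈ pvBfsLoop adj ss ((s :: sel').length + 1) [s] [s] := r3 s (by simp)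
    exact Nat.le_antisymm
      (nodup_subset_length_le _ _ r1 hssnd (fun x hx => (r2 x hx).1))
      (nodup_subset_length_le _ _ hssnd r1
        (fun x hx => conn_mem_closed adj ss _ s hsR r4 x (hconn x hx)))

-- B's verdict: a single label class among ss iff every selected vertex is connected to sel[0]
theorem B_branch_eq (adj : List (List Int)) (sel : List Int)
    (hsym : ∀ x y, pvE adj (PySem.Set.ofList sel) x y → pvE adj (PySem.Set.ofList sel) y x)
    (s : Int) (hsmem : s ∈ PySem.Set.ofList sel) :
    ((PySem.Set.len (PySem.Set.ofList
        (pvUnionEdges adj (PySem.Set.ofList sel)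
          ((PySem.Set.ofList sel).foldl (fun d u => d.insert u u) PySem.Dict.empty)).values) == 1) = true)
      ↔ (∀ w ∈ PySem.Set.ofList sel, pvConn adj (PySem.Set.ofList sel) s w) := by
  set ss := PySem.Set.ofList sel with hss
  have hssnd : ss.Nodup := PySem.Set.nodup_ofList _
  set comp0 := ss.foldl (fun d u => d.insert u u) PySem.Dict.empty with hcomp0
  have hkeys0 : comp0.keys = ss := by
    rw [hcomp0, PySem.Dict.keys_foldl_insert ss (fun _ u => u) PySem.Dict.empty]
    rw [PySem.Dict.keys_empty, PySem.Set.update_nil_left, hss, PySem.Set.ofList_ofList]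
  have hget0 : ∀ x ∈ ss, comp0.getD x 0 = x := by
    intro x hx
    rw [hcomp0, comp0_getD, if_pos hx]
  have hsound0 : pvSound adj ss comp0 := by
    intro x hx y hy h
    rw [hget0 x hx, hget0 y hy] at h
    rw [h]
    exact Relation.ReflTransGen.refl
  have hcomp_eq : pvUnionEdges adj ss comp0 =
      ss.foldl (fun c u =>
        (pvRow adj u).foldl (fun c w =>
          if c.contains w then
            (if c.getD u 0 ≠ c.getD w 0 then pvRelabel c (c.getD u 0) (c.getD w 0) else c)
          else c) c) comp0 := rfl
  obtain ⟨k1, s1, _, cp1⟩ := pvUnionEdges_spec adj ss hssnd hsym ss comp0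
    (fun u hu => hu) hkeys0 hsound0
  rw [← hcomp_eq] at k1 s1 cp1
  have hndk : (pvUnionEdges adj ss comp0).keys.Nodup := by rw [k1]; exact hssnd
  have hvals : (pvUnionEdges adj ss comp0).values
      = ss.map (fun k => (pvUnionEdges adj ss comp0).getD k 0) := by
    rw [PySem.Dict.values_eq_map_keys _ hndk 0, k1]
  have hlab : ∀ x ∈ ss, ∀ y ∈ ss,
      ((pvUnionEdges adj ss comp0).getD x 0 = (pvUnionEdges adj ss comp0).getD y 0
        ↔ pvConn adj ss x y) := by
    intro x hx y hy
    exact ⟨fun h => s1 x hx y hy h, fun h => conn_label_eq adj ss _ cp1 x y h⟩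
  have hlen_iff : (PySem.Set.len (PySem.Set.ofList (pvUnionEdges adj ss comp0).values) == 1) = true
      ↔ (PySem.Set.ofList (pvUnionEdges adj ss comp0).values).length = 1 := by
    simp [PySem.Set.len]
  rw [hlen_iff, ofList_length_eq_one_iff]
  constructor
  · rintro ⟨_, hall⟩ w hw
    rw [← hlab s hsmem w hw]
    apply hall
    · rw [hvals]; exact List.mem_map.2 ⟨s, hsmem, rfl⟩
    · rw [hvals]; exact List.mem_map.2 ⟨w, hw, rfl⟩
  · intro hconn
    constructor
    · rw [hvals]
      intro hc
      have hmem : (pvUnionEdges adj ss comp0).getD s 0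
          ∈ ss.map (fun k => (pvUnionEdges adj ss comp0).getD k 0) :=
        List.mem_map.2 ⟨s, hsmem, rfl⟩
      rw [hc] at hmem
      simp at hmem
    · intro a ha b hb
      rw [hvals] at ha hb
      obtain ⟨x, hx, rfl⟩ := List.mem_map.1 ha
      obtain ⟨y, hy, rfl⟩ := List.mem_map.1 hb
      rw [hlab x hx y hy]
      exact ((Relation.ReflTransGen.symmetric hsym) (hconn x hx)).trans (hconn y hy)

theorem pyGetD_head (s : Int) (sel' : List Int) :
    PySem.List.pyGetD (s :: sel') 0 0 = s := by
  rw [PySem.List.pyGetD_of_nonneg _ _ le_rfl]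
  rfl

-- under a failed-domination certificate the shared scan answers False in both programs
theorem dom_scan_false (adj : List (List Int)) (sel : List Int) (n : Int)
    (hv : ∃ v ∈ List.range n.toNat, ((v : Int) ∉ sel ∧ ∀ w ∈ adj.getD v [], w ∉ sel)) :
    ((PySem.List.pyRange 0 n 1).all
      (fun v => decide (v ∈ PySem.Set.ofList sel) ||
        !(PySem.Set.inter (pvRow adj v) (PySem.Set.ofList sel)).isEmpty)) = false := by
  obtain ⟨v, hvr, hvs, hrow⟩ := hv
  rw [List.all_eq_false]
  refine ⟨(v : Int), ?_, ?_⟩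
  · rw [PySem.List.mem_pyRange_one]
    simp only [List.mem_range] at hvr
    omega
  · have hrow' : pvRow adj (v : Int) = adj.getD v [] := by
      rw [pvRow, PySem.List.pyGetD_of_nonneg _ _ (by positivity)]
      simp
    have hint : PySem.Set.inter (pvRow adj (v : Int)) (PySem.Set.ofList sel) = [] := by
      rw [List.eq_nil_iff_forall_not_mem]
      intro y hy
      rw [PySem.Set.mem_inter] at hy
      obtain ⟨hy1, hy2⟩ := hy
      rw [hrow'] at hy1
      exact hrow y hy1 ((PySem.Set.mem_ofList _ _).1 hy2)
    simp [hint, PySem.Set.mem_ofList, hvs]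

-- one nonempty-selection case, given symmetry of the selected-subgraph edge relation
theorem cons_case (adj : List (List Int)) (n : Int) (s : Int) (sel' : List Int)
    (hsym : ∀ x y, pvE adj (PySem.Set.ofList (s :: sel')) x y →
      pvE adj (PySem.Set.ofList (s :: sel')) y x) :
    is_cds adj (s :: sel') n = is_cds_alt adj (s :: sel') n := by
  have hsmem : s ∈ PySem.Set.ofList (s :: sel') :=
    (PySem.Set.mem_ofList _ _).2 (List.mem_cons_self)
  unfold is_cds is_cds_alt
  simp only [List.isEmpty_cons, Bool.false_eq_true, if_false, pyGetD_head]
  split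
  · apply Bool.eq_iff_iff.2
    rw [B_branch_eq adj (s :: sel') hsym s hsmem]
    split
    · rename_i hone
      constructor
      · intro _ w hw
        simp only [List.length_cons, beq_iff_eq, Nat.add_eq_right,
          List.length_eq_zero_iff] at hone
        subst hone
        have hws : w = s := by
          have := (PySem.Set.mem_ofList _ _).1 hw
          simpa using this
        subst hws
        exact Relation.ReflTransGen.refl
      · intro _
        rfl
    · exact A_branch_eq adj s sel' hsmem
  · rfl

theorem is_cds_spec : Claim_equal_is_cds := by
  unfold Claim_equal_is_cds
  intro adj sel n _ hpre
  unfold Spec_is_cds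
  rcases hpre with ⟨hnil, _⟩ | hundom | ⟨hn, hne, hall, h0, hlt⟩ | ⟨hn, hsel, hadj⟩
  · subst hnil
    show is_cds adj [] n = is_cds_alt adj [] n
    unfold is_cds is_cds_alt
    simp only [List.isEmpty_nil, if_true]
    split
    · rfl
    · rfl
  · obtain ⟨v, hvr, hvp⟩ := hundom
    have hdom := dom_scan_false adj sel n
      ⟨v, by simp only [List.mem_range] at hvr ⊢; omega, hvp⟩
    simp only [is_cds, is_cds_alt]
    rw [hdom]
    simp
  · cases sel with
    | nil => exact absurd rfl hne
    | cons s sel' =>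
      apply cons_case
      intro x y h
      have hss1 : PySem.Set.ofList (s :: sel') = [s] := by
        apply nodup_all_eq s _ (PySem.Set.nodup_ofList _)
        · intro hc
          have : s ∈ PySem.Set.ofList (s :: sel') :=
            (PySem.Set.mem_ofList _ _).2 (List.mem_cons_self)
          rw [hc] at this
          simp at this
        · intro x hx
          have hx' := (PySem.Set.mem_ofList _ _).1 hx
          have := hall x hx'
          simpa using this
      obtain ⟨hx, hy, hrow⟩ := h
      rw [hss1] at hx hy
      simp at hx hy
      subst hx; subst hy
      exact ⟨by rw [hss1]; simp, by rw [hss1]; simp, hrow⟩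
  · cases sel with
    | nil =>
      show is_cds adj [] n = is_cds_alt adj [] n
      unfold is_cds is_cds_alt
      simp only [List.isEmpty_nil, if_true]
      split
      · rfl
      · rfl
    | cons s sel' =>
      exact cons_case adj n s sel' (fun x y h => pvE_symm adj (s :: sel') hadj h)
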